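-- pv_equiv track=rewrite | github.com/Sanpa33/Introduccion-a-la-programacion | Practicas/Practica7/Practica7.py | tresVocalesDistintas
-- ===== SOURCE A (Python) =====
-- def quitarLetra(letra:str,string:str) -> str:
--
--     nuevaCadena:str = ""
--
--     for caracter in string:
--         if not(letra == caracter):
--             nuevaCadena+=caracter
--
--     return nuevaCadena
--
-- def tresVocalesDistintas(palabra:str) -> bool:
--
--     contador = 0
--
--     while (len(palabra) > 0):
--
--         if (palabra[0] == "a" or palabra[0] == "e" or palabra[0] == "i" or palabra[0] == "o" or palabra[0] == "u" ):
--             contador +=1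
--             palabra = quitarLetra(palabra[0],palabra)
--         else:
--             palabra = quitarLetra(palabra[0],palabra)
--
--
--     if (contador >= 3):
--         return True
--
--     return False
-- ===== SOURCE B (Python) =====
-- def tresVocalesDistintas(palabra: str) -> bool:
--     return sum(1 for v in "aeiou" if v in palabra) >= 3
-- ===== Notes on version B (the rewrite author's own statement) =====
-- stated objective: idiomatic
-- what changed: Replaces A's dedup-by-deletion while-loop (repeatedly rebuilding the string without its first character) by a single comprehension over the five fixed vowels counting which occur in the word.
import Mathlib
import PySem

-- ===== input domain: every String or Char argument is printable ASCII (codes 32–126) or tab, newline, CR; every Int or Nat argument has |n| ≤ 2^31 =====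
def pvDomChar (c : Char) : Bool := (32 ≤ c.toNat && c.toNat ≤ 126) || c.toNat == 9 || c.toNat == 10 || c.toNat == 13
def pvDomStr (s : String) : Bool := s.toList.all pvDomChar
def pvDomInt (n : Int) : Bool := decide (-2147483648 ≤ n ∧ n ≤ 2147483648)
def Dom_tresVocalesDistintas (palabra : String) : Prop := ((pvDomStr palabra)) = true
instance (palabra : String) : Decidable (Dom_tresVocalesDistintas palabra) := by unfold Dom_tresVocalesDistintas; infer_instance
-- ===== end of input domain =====

-- B replaces A's quadratic dedup-by-deletion loop by counting, over the five fixed vowels, which occur in the word (idiomatic/faster).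

-- ===== PORT A =====
-- helper: quitarLetra builds a new string keeping the characters different from letra
def quitarLetra (letra : Char) (string : List Char) : List Char :=
  string.foldl (fun nuevaCadena caracter =>
    if !(letra == caracter) then nuevaCadena ++ [caracter] else nuevaCadena) []

lemma quitarLetra_eq_filter (letra : Char) (l : List Char) :
    quitarLetra letra l = l.filter (fun c => !(letra == c)) := by
  suffices h : ∀ acc : List Char,
      l.foldl (fun nuevaCadena caracter =>
        if !(letra == caracter) then nuevaCadena ++ [caracter] else nuevaCadena) acc
      = acc ++ l.filter (fun c => !(letra == c)) by
    simpa [quitarLetra] using h []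
  induction l with
  | nil => simp
  | cons h t ih =>
    intro acc
    rw [List.foldl_cons, ih, List.filter_cons]
    by_cases hc : letra = h <;> simp [hc]

lemma quitarLetra_head_length_lt (h : Char) (t : List Char) :
    (quitarLetra h (h :: t)).length < (h :: t).length := by
  rw [quitarLetra_eq_filter]
  simp only [List.filter]
  simp only [beq_self_eq_true, Bool.not_true]
  exact Nat.lt_succ_of_le (List.length_filter_le _ t)

-- the while-loop of A, recursing on the shrinking word
def loopA (palabra : List Char) (contador : Int) : Int :=
  match hm : palabra with
  | [] => contador
  | c :: rest =>
    if c == 'a' || c == 'e' || c == 'i' || c == 'o' || c == 'u' then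
      loopA (quitarLetra c (c :: rest)) (contador + 1)
    else
      loopA (quitarLetra c (c :: rest)) contador
termination_by palabra.length
decreasing_by all_goals
  (have hlt := quitarLetra_head_length_lt c rest
   simp only [List.length_cons] at hlt ⊢; omega)

def tresVocalesDistintas (palabra : String) : Bool :=
  let contador := loopA palabra.toList 0
  if contador ≥ 3 then true else false

-- ===== PORT B =====
def tresVocalesDistintas_alt (palabra : String) : Bool :=
  decide ((['a','e','i','o','u'].foldl
      (fun acc v => if palabra.toList.contains v then acc + 1 else acc) (0 : Int)) ≥ 3)

-- ===== PRECONDITION & SPEC =====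
def Spec_tresVocalesDistintas (palabra : String) (out : Bool) : Prop := out = tresVocalesDistintas_alt palabra
instance (palabra : String) (out : Bool) : Decidable (Spec_tresVocalesDistintas palabra out) := by unfold Spec_tresVocalesDistintas; infer_instance

-- ===== CLAIM (what is proved, stated in full; the proofs are below) =====
def Claim_equal_tresVocalesDistintas : Prop := ∀ (palabra : String), Dom_tresVocalesDistintas palabra → Spec_tresVocalesDistintas palabra (tresVocalesDistintas palabra)

-- ===== LEMMAS AND PROOFS =====

-- number of distinct vowels occurring in l (B's count)
def vcount (l : List Char) : Int :=
  ['a','e','i','o','u'].foldl (fun acc v => if l.contains v then acc + 1 else acc) (0 : Int)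

lemma contains_filter_ne (h : Char) (l : List Char) (v : Char) :
    (l.filter (fun c => !(h == c))).contains v = (l.contains v && !(h == v)) := by
  rw [Bool.eq_iff_iff]
  simp [List.mem_filter, and_comm]

lemma vcount_cons (h : Char) (t : List Char) :
    vcount (h :: t)
      = vcount ((h :: t).filter (fun c => !(h == c)))
        + (if h == 'a' || h == 'e' || h == 'i' || h == 'o' || h == 'u' then 1 else 0) := by
  simp only [vcount, List.foldl, contains_filter_ne]
  by_cases ha : h = 'a'
  · subst ha; simp; split_ifs <;> simp_all
  · by_cases he : h = 'e'
    · subst he; simp; split_ifs <;> simp_all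
    · by_cases hi : h = 'i'
      · subst hi; simp; split_ifs <;> simp_all
      · by_cases ho : h = 'o'
        · subst ho; simp; split_ifs <;> simp_all
        · by_cases hu : h = 'u'
          · subst hu; simp
          · simp [ha, he, hi, ho, hu]

lemma loopA_eq_vcount : ∀ (n : Nat) (l : List Char) (c : Int), l.length ≤ n →
    loopA l c = c + vcount l := by
  intro n
  induction n with
  | zero =>
    intro l c hl
    have : l = [] := List.length_eq_zero_iff.mp (Nat.le_zero.mp hl)
    subst this
    simp [loopA, vcount]
  | succ n ih =>
    intro l c hl
    match l with
    | [] => simp [loopA, vcount]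
    | h :: t =>
      have hlen : (quitarLetra h (h :: t)).length ≤ n := by
        have h1 := quitarLetra_head_length_lt h t
        simp only [List.length_cons] at h1 hl
        omega
      rw [loopA]
      rw [vcount_cons h t]
      by_cases hv : (h == 'a' || h == 'e' || h == 'i' || h == 'o' || h == 'u') = true
      · rw [if_pos hv, if_pos hv]
        rw [ih _ _ hlen, quitarLetra_eq_filter]
        ring
      · rw [if_neg hv, if_neg hv]
        rw [ih _ _ hlen, quitarLetra_eq_filter]
        ring

-- ===== VERDICT (by name: the statement is the Claim_ definition above) =====
theorem tresVocalesDistintas_spec : Claim_equal_tresVocalesDistintas := by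
  intro palabra _
  unfold Spec_tresVocalesDistintas tresVocalesDistintas
  rw [loopA_eq_vcount palabra.toList.length _ _ le_rfl, zero_add]
  have hv : tresVocalesDistintas_alt palabra = decide (vcount palabra.toList ≥ 3) := rfl
  rw [hv]
  by_cases h : vcount palabra.toList ≥ 3 <;> simp [h]
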